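-- pv_equiv track=rewrite | github.com/katfishy/migDNA | mutations.py | seqtoinsert
-- ===== SOURCE A (Python) =====
-- def seqtoinsert(seq1: str, seq2: str) -> bool:
--     """Return True if seq2 has a single nucleotide insertion mutation of seq1.
--
--     >>> seqtoinsert('AATGC', 'AATGTC')
--     True
--     >>> seqtoinsert('AACC', 'AACCT')
--     True
--     """
--
--     i = 0
--     while i < len(seq1) and i < len(seq2) and seq1[i] == seq2[i]:
--         i += 1
--
--     # Check for any insertion that is in the MIDDLE of seq1.
--     if i != len(seq1) and len(seq2) > len(seq1):
--         result = 0
--         for pos in range(i, len(seq1)):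
--             if seq1[pos] == seq2[pos + 1]:
--                 result += 1
--         return result == len(seq2) - (i + 1) and len(seq2) == len(seq1) + 1
--
--     # Check for insertion that is at the END of seq1.
--     else:
--         return len(seq2) == len(seq1) + 1 and i == len(seq1)
-- ===== SOURCE B (Python) =====
-- def seqtoinsert(seq1: str, seq2: str) -> bool:
--     """Return True if seq2 is seq1 with exactly one character inserted
--     (two-ended scan: common prefix + common suffix must cover seq1)."""
--     n = len(seq1)
--     if len(seq2) != n + 1:
--         return False
--     p = 0
--     while p < n and seq1[p] == seq2[p]:
--         p += 1
--     s = 0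
--     while s < n - p and seq1[n - 1 - s] == seq2[len(seq2) - 1 - s]:
--         s += 1
--     return p + s >= n
-- ===== Notes on version B (the rewrite author's own statement) =====
-- stated objective: simpler
-- what changed: Replaces A's front scan plus shifted match-counting pass over the whole remainder with an early length check and a symmetric prefix/suffix scan from both ends that stops at the first mismatch, returning True iff prefix+suffix cover seq1.
import Mathlib
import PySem

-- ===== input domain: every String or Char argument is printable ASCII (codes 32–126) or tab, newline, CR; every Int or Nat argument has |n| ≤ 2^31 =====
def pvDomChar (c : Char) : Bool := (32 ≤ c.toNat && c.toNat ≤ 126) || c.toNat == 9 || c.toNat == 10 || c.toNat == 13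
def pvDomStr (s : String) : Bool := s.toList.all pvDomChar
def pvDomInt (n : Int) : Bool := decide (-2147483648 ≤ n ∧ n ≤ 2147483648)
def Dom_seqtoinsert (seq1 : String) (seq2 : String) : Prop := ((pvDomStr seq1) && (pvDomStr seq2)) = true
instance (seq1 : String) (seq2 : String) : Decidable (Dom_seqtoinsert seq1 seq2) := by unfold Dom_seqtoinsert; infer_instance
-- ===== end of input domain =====

-- B replaces A's front scan + shifted match-counting pass with a length check and a
-- symmetric prefix/suffix scan from both ends (objective: simpler; same O(n) cost).

-- ===== PORT A =====
-- the initial while loop: advance i while both indices are in range and the chars agree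
def aPrefix (l1 l2 : List Char) (i : Nat) : Nat :=
  if i < l1.length ∧ i < l2.length ∧ l1[i]? = l2[i]? then aPrefix l1 l2 (i + 1) else i
termination_by l1.length - i
decreasing_by omega

def seqtoinsert (seq1 : String) (seq2 : String) : Bool :=
  let l1 := seq1.toList
  let l2 := seq2.toList
  let i := aPrefix l1 l2 0
  if i ≠ l1.length ∧ l2.length > l1.length then
    -- for pos in range(i, len(seq1)): count shifted matches
    let result : Nat :=
      (List.range' i (l1.length - i)).foldl
        (fun r pos => if l1[pos]? = l2[pos + 1]? then r + 1 else r) 0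
    decide ((result : Int) = (l2.length : Int) - (i + 1)) && decide (l2.length = l1.length + 1)
  else
    decide (l2.length = l1.length + 1) && decide (i = l1.length)

-- ===== PORT B =====
-- common-prefix length: while p < n and seq1[p] == seq2[p]
def bPrefix (l1 l2 : List Char) (p : Nat) : Nat :=
  if p < l1.length ∧ l1[p]? = l2[p]? then bPrefix l1 l2 (p + 1) else p
termination_by l1.length - p
decreasing_by omega

-- common-suffix length capped at n - p: while s < n - p and seq1[n-1-s] == seq2[len2-1-s]
def bSuffix (l1 l2 : List Char) (p s : Nat) : Nat :=
  if s < l1.length - p ∧ l1[l1.length - 1 - s]? = l2[l2.length - 1 - s]? then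
    bSuffix l1 l2 p (s + 1)
  else s
termination_by l1.length - p - s
decreasing_by omega

def seqtoinsert_alt (seq1 : String) (seq2 : String) : Bool :=
  let l1 := seq1.toList
  let l2 := seq2.toList
  let n := l1.length
  if l2.length ≠ n + 1 then false
  else
    let p := bPrefix l1 l2 0
    let s := bSuffix l1 l2 p 0
    decide (n ≤ p + s)

-- ===== PRECONDITION & SPEC =====
def Spec_seqtoinsert (seq1 : String) (seq2 : String) (out : Bool) : Prop := out = seqtoinsert_alt seq1 seq2
instance (seq1 : String) (seq2 : String) (out : Bool) : Decidable (Spec_seqtoinsert seq1 seq2 out) := by unfold Spec_seqtoinsert; infer_instance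

-- ===== CLAIM (what is proved, stated in full; the proofs are below) =====
def Claim_equal_seqtoinsert : Prop := ∀ (seq1 : String) (seq2 : String), Dom_seqtoinsert seq1 seq2 → Spec_seqtoinsert seq1 seq2 (seqtoinsert seq1 seq2)

-- ===== LEMMAS AND PROOFS =====

-- when len2 = len1 + 1, the two prefix loops have equivalent guards
theorem prefix_eq (l1 l2 : List Char) (hl : l2.length = l1.length + 1) :
    ∀ i, aPrefix l1 l2 i = bPrefix l1 l2 i := by
  intro i
  induction hm : l1.length - i using Nat.strong_induction_on generalizing i with
  | _ m ih =>
    rw [aPrefix, bPrefix]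
    by_cases h : i < l1.length ∧ l1[i]? = l2[i]?
    · rw [if_pos ⟨h.1, by omega, h.2⟩, if_pos h]
      exact ih (l1.length - (i + 1)) (by omega) (i + 1) rfl
    · rw [if_neg (fun hc => h ⟨hc.1, hc.2.2⟩), if_neg h]

theorem bPrefix_le (l1 l2 : List Char) : ∀ i, i ≤ l1.length → bPrefix l1 l2 i ≤ l1.length := by
  intro i
  induction hm : l1.length - i using Nat.strong_induction_on generalizing i with
  | _ m ih =>
    intro hi
    rw [bPrefix]
    split_ifs with h
    · exact ih (l1.length - (i + 1)) (by omega) (i + 1) rfl (by omega)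
    · exact hi

theorem foldl_count (l1 l2 : List Char) :
    ∀ (l : List Nat) (r : Nat),
      l.foldl (fun r pos => if l1[pos]? = l2[pos + 1]? then r + 1 else r) r
        = r + l.countP (fun pos => decide (l1[pos]? = l2[pos + 1]?)) := by
  intro l
  induction l with
  | nil => simp
  | cons x xs ih =>
    intro r
    rw [List.foldl_cons, List.countP_cons, ih]
    by_cases h : l1[x]? = l2[x + 1]? <;> simp [h] <;> omega

-- characterisation of the suffix loop: it covers n - p iff every shifted position matches
theorem bSuffix_iff (l1 l2 : List Char) (hl : l2.length = l1.length + 1)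
    (p : Nat) (hp : p ≤ l1.length) :
    ∀ s, s ≤ l1.length - p →
      (l1.length ≤ p + bSuffix l1 l2 p s ↔
        ∀ pos, p ≤ pos → pos + s < l1.length → l1[pos]? = l2[pos + 1]?) := by
  intro s
  induction hm : l1.length - p - s using Nat.strong_induction_on generalizing s with
  | _ m ih =>
    intro hs
    rw [bSuffix]
    split_ifs with h
    · obtain ⟨h1, h2⟩ := h
      rw [ih (l1.length - p - (s + 1)) (by omega) (s + 1) rfl (by omega)]
      constructor
      · intro hall pos hp1 hp2
        by_cases hpos : pos + s + 1 < l1.length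
        · exact hall pos hp1 hpos
        · have : pos = l1.length - 1 - s := by omega
          subst this
          have : l1.length - 1 - s + 1 = l2.length - 1 - s := by omega
          rw [this]; exact h2
      · intro hall pos hp1 hp2
        exact hall pos hp1 (by omega)
    · constructor
      · intro hge pos hp1 hp2
        omega
      · intro hall
        by_cases hsn : s < l1.length - p
        · exfalso
          apply h
          refine ⟨hsn, ?_⟩
          have h1 := hall (l1.length - 1 - s) (by omega) (by omega)
          have : l1.length - 1 - s + 1 = l2.length - 1 - s := by omega
          rw [this] at h1
          exact h1
        · omega

-- ===== VERDICT (by name: the statement is the Claim_ definition above) =====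
theorem seqtoinsert_spec : Claim_equal_seqtoinsert := by
  intro seq1 seq2 _
  simp only [Spec_seqtoinsert, seqtoinsert, seqtoinsert_alt]
  set l1 := seq1.toList with hl1
  set l2 := seq2.toList with hl2
  by_cases hlen : l2.length = l1.length + 1
  · conv_rhs => rw [if_neg (by omega)]
    have hpe := prefix_eq l1 l2 hlen 0
    have hple : bPrefix l1 l2 0 ≤ l1.length := bPrefix_le l1 l2 0 (Nat.zero_le _)
    rw [hpe]
    set p := bPrefix l1 l2 0 with hp
    by_cases hpn : p = l1.length
    · conv_lhs => rw [if_neg (show ¬(p ≠ l1.length ∧ l2.length > l1.length) by omega)]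
      simp [hlen, hpn]
    · conv_lhs => rw [if_pos (show p ≠ l1.length ∧ l2.length > l1.length from ⟨hpn, by omega⟩)]
      rw [foldl_count]
      have hiff := bSuffix_iff l1 l2 hlen p hple 0 (Nat.zero_le _)
      have hcnt := List.countP_eq_length
        (p := fun pos => decide (l1[pos]? = l2[pos + 1]?)) (l := List.range' p (l1.length - p))
      have hlenr : (List.range' p (l1.length - p)).length = l1.length - p := by
        simp [List.length_range']
      set c := (List.range' p (l1.length - p)).countP
          (fun pos => decide (l1[pos]? = l2[pos + 1]?)) with hc
      have hcle : c ≤ (List.range' p (l1.length - p)).length := List.countP_le_length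
      by_cases hall : ∀ pos, p ≤ pos → pos < l1.length → l1[pos]? = l2[pos + 1]?
      · have hcount : c = l1.length - p := by
          refine Eq.trans (hcnt.mpr ?_) hlenr
          intro a ha
          rw [List.mem_range'_1] at ha
          exact decide_eq_true (hall a ha.1 (by omega))
        have hB : l1.length ≤ p + bSuffix l1 l2 p 0 := by
          rw [hiff]; intro pos h1 h2; exact hall pos h1 (by omega)
        have h1 : ((0 + c : Nat) : Int) = (l2.length : Int) - (p + 1) := by omega
        rw [decide_eq_true h1, decide_eq_true hlen, decide_eq_true hB]
        rfl
      · push Not at hall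
        obtain ⟨pos, hq1, hq2, hq3⟩ := hall
        have hcl : c ≠ (List.range' p (l1.length - p)).length := by
          intro hcontra
          exact hq3 (of_decide_eq_true (hcnt.mp hcontra pos (by rw [List.mem_range'_1]; omega)))
        have hcount : c ≠ l1.length - p := fun hceq => hcl (by rw [hlenr]; exact hceq)
        have hB : ¬ l1.length ≤ p + bSuffix l1 l2 p 0 := by
          rw [hiff]
          push Not
          exact ⟨pos, hq1, by omega, hq3⟩
        have h1 : ¬ ((0 + c : Nat) : Int) = (l2.length : Int) - (p + 1) := by omega
        rw [decide_eq_false h1, decide_eq_false hB]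
        simp
  · conv_rhs => rw [if_pos (by omega)]
    split_ifs <;> simp [hlen]
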